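-- pv_equiv track=rewrite | github.com/ConnorDBurge/CP-Prep-Work | challenges/credit-check/python/credit_check.py | times_two
-- ===== SOURCE A (Python) =====
-- def times_two(digit_list):
--     credit_numbers = list()
--     for i, num in enumerate(reversed(digit_list)):
--         if i % 2 == 0:
--             credit_numbers.insert(0, num)
--         else:
--             credit_numbers.insert(0, num * 2)
--     return credit_numbers
-- ===== SOURCE B (Python) =====
-- def times_two(digit_list):
--     # Walk the list left-to-right in aligned pairs: after peeling one leading
--     # element when the length is odd, every pair is (double, keep).
--     n = len(digit_list)
--     if n % 2 == 1:
--         out, i = [digit_list[0]], 1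
--     else:
--         out, i = [], 0
--     while i < n:
--         out.append(digit_list[i] * 2)
--         out.append(digit_list[i + 1])
--         i += 2
--     return out
-- ===== Notes on version B (the rewrite author's own statement) =====
-- stated objective: alternative
-- what changed: A reverses the list and front-inserts each element after an index-parity test; B makes one forward pass consuming aligned pairs (after peeling one leading element when the length is odd), doubling the first of each pair with no reversal, no enumerate and no parity branch per element.
import Mathlib
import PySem

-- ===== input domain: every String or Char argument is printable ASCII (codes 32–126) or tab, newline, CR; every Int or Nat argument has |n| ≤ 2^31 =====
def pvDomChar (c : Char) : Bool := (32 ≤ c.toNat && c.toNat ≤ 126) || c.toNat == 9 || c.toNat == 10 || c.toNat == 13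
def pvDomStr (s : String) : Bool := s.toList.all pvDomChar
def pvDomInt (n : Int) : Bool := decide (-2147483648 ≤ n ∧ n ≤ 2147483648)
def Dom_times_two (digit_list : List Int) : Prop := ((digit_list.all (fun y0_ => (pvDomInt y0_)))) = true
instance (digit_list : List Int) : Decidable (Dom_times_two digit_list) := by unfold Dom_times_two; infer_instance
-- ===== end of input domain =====

-- ===== PORT A =====
-- Header: B replaces A's reverse+enumerate+parity-branch+front-insert walk with a single
-- forward pass over aligned pairs; equivalence of return values proved below (no mutation escapes).
def times_two (digit_list : List Int) : List Int :=
  (PySem.List.enumerate digit_list.reverse 0).foldl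
    (fun credit_numbers p =>
      if PySem.Int.mod p.1 2 == 0 then p.2 :: credit_numbers
      else p.2 * 2 :: credit_numbers) []

-- ===== PORT B =====
-- the while loop of Source B over the even-length suffix, two elements per step
def twoGo : List Int → List Int
  | [] => []
  | [a] => [a * 2]   -- unreachable: the loop is only entered on an even-length suffix
  | a :: b :: r => a * 2 :: b :: twoGo r

def times_two_alt (digit_list : List Int) : List Int :=
  if digit_list.length % 2 == 1 then
    match digit_list with
    | [] => []        -- unreachable: an odd-length list is nonempty
    | x :: xs => x :: twoGo xs
  else twoGo digit_list

-- ===== PRECONDITION & SPEC =====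
def Spec_times_two (digit_list : List Int) (out : List Int) : Prop := out = times_two_alt digit_list
instance (digit_list : List Int) (out : List Int) : Decidable (Spec_times_two digit_list out) := by unfold Spec_times_two; infer_instance

-- ===== CLAIM (what is proved, stated in full; the proofs are below) =====
def Claim_equal_times_two : Prop := ∀ (digit_list : List Int), Dom_times_two digit_list → Spec_times_two digit_list (times_two digit_list)

-- ===== LEMMAS AND PROOFS =====

-- reference shape: tspec b l doubles the head iff b, alternating down the list
def tspec : Bool → List Int → List Int
  | _, [] => []
  | b, x :: xs => (if b then x * 2 else x) :: tspec (!b) xs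

-- the per-index map A's fold computes, before the final reversal
def gmap : Int → List Int → List Int
  | _, [] => []
  | s, x :: xs => (if PySem.Int.mod s 2 == 0 then x else x * 2) :: gmap (s + 1) xs

theorem gmap_append (u v : List Int) (s : Int) :
    gmap s (u ++ v) = gmap s u ++ gmap (s + u.length) v := by
  induction u generalizing s with
  | nil => simp [gmap]
  | cons a u ih =>
      simp [gmap, ih (s + 1)]
      ring_nf

theorem foldA (r : List Int) (s : Int) (acc : List Int) :
    (PySem.List.enumerate r s).foldl
      (fun credit_numbers p =>
        if PySem.Int.mod p.1 2 == 0 then p.2 :: credit_numbers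
        else p.2 * 2 :: credit_numbers) acc
    = (gmap s r).reverse ++ acc := by
  induction r generalizing s acc with
  | nil => simp [PySem.List.enumerate_nil, gmap]
  | cons x xs ih =>
      rw [PySem.List.enumerate_cons]
      simp only [List.foldl_cons, ih, gmap, List.reverse_cons, List.append_assoc,
        List.singleton_append]
      congr 1
      split <;> rfl

theorem A_eq_tspec (l : List Int) :
    times_two l = tspec (decide (l.length % 2 = 0)) l := by
  induction l with
  | nil => simp [times_two, PySem.List.enumerate_nil, tspec]
  | cons x xs ih =>
      have hA : ∀ m : List Int, times_two m = (gmap 0 m.reverse).reverse := by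
        intro m; simpa [times_two] using foldA m.reverse 0 []
      rw [hA] at ih ⊢
      rw [List.reverse_cons, gmap_append, List.reverse_append]
      rcases Nat.mod_two_eq_zero_or_one xs.length with h | h <;>
        simp [gmap, tspec, ih, h, Nat.add_mod, List.reverse_cons] <;>
        · intro hc; exfalso; omega

theorem twoGo_even (r : List Int) (h : r.length % 2 = 0) : twoGo r = tspec true r := by
  induction r using twoGo.induct with
  | case1 => simp [twoGo, tspec]
  | case2 a => simp at h
  | case3 a b r ih =>
      simp at h
      simp [twoGo, tspec, ih (by omega)]

theorem B_eq_tspec (l : List Int) :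
    times_two_alt l = tspec (decide (l.length % 2 = 0)) l := by
  rcases Nat.mod_two_eq_zero_or_one l.length with h | h
  · simp [times_two_alt, h, twoGo_even l h]
  · match l with
    | [] => simp at h
    | x :: xs =>
        simp at h
        have hx : xs.length % 2 = 0 := by omega
        simp [times_two_alt, h, tspec, twoGo_even xs hx]

-- ===== VERDICT (by name: the statement is the Claim_ definition above) =====
theorem times_two_spec : Claim_equal_times_two := by
  intro l _
  unfold Spec_times_two
  rw [A_eq_tspec, B_eq_tspec]
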